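-- pv_equiv track=rewrite | github.com/carnarez/astdocs | web/content/extras/object_graph/object_graph.py | is_local
-- ===== SOURCE A (Python) =====
-- def is_local(p: str, objects: list[str]) -> bool:
--     """Check whether an object is local, or external, looking at its path.
--
--     Parameters
--     ----------
--     p : str
--         String representation of the object path.
--     objects : list[str]
--         List of local objects to check for.
--
--     Returns
--     -------
--     : bool
--         Whether the object is local or external to the `Python` parsed package(s).
--     """
--     if p in objects:
--         return True
--
--     if not p.endswith("."):
--         p += "."
--
--     for o in objects:
--         if p.startswith(f"{o}."):
--             return True
--         for m in o.split("."):
--             if p.startswith(f"{m}."):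
--                 return True
--
--     return False
-- ===== SOURCE B (Python) =====
-- def is_local(p: str, objects: list[str]) -> bool:
--     """Check whether an object is local, or external, looking at its path."""
--     if p in objects:
--         return True
--
--     s = set(objects)
--     for o in objects:
--         s.update(o.split("."))
--
--     q = p if p.endswith(".") else p + "."
--     for i, ch in enumerate(q):
--         if ch == "." and q[:i] in s:
--             return True
--
--     return False
-- ===== Notes on version B (the rewrite author's own statement) =====
-- stated objective: alternative
-- what changed: Replaces A's per-object startswith scans (object plus each of its dot-segments against the normalized path) by a precomputed set of all objects and segments and a single pass over the dot positions of the normalized path, testing each dot-prefix for set membership.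
import Mathlib
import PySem

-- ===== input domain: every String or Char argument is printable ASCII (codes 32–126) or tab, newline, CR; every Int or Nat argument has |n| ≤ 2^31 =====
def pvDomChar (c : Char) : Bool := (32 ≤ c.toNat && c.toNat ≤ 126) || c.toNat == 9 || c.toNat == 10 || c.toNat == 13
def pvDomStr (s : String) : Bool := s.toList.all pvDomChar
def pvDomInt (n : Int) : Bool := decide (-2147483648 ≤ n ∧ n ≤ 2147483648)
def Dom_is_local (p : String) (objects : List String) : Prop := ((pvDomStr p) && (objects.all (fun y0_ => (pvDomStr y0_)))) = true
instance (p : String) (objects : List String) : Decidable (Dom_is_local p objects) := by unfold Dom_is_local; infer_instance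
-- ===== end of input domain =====

-- B replaces A's per-object startswith scans by one precomputed set of objects and their
-- dot-segments plus a single pass over the dot-prefixes of p (objective: alternative).

-- ===== PORT A =====
def is_local (p : String) (objects : List String) : Bool :=
  if objects.contains p then true
  else
    -- `if not p.endswith("."): p += "."`
    let q : List Char := if PySem.Chars.endswith p.toList ['.'] then p.toList else p.toList ++ ['.']
    -- for o in objects: startswith check, then the same for each m in o.split(".")
    objects.any (fun o =>
      PySem.Chars.startswith q (o.toList ++ ['.']) ||
      (PySem.Chars.splitOn o.toList ['.']).any (fun m => PySem.Chars.startswith q (m ++ ['.'])))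

-- ===== PORT B =====
def is_local_alt (p : String) (objects : List String) : Bool :=
  if objects.contains p then true
  else
    -- s = set(objects); for o in objects: s.update(o.split("."))
    let s : PySem.Set (List Char) :=
      objects.foldl (fun s o => PySem.Set.update s (PySem.Chars.splitOn o.toList ['.']))
        (PySem.Set.ofList (objects.map String.toList))
    -- q = p if p.endswith(".") else p + "."
    let q : List Char := if PySem.Chars.endswith p.toList ['.'] then p.toList else p.toList ++ ['.']
    -- for i, ch in enumerate(q): if ch == "." and q[:i] in s: return True
    (PySem.List.enumerate q).any (fun ic =>
      ic.2 == '.' && PySem.Set.contains s (PySem.List.slice q none (some ic.1)))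

-- ===== PRECONDITION & SPEC =====
def Spec_is_local (p : String) (objects : List String) (out : Bool) : Prop := out = is_local_alt p objects
instance (p : String) (objects : List String) (out : Bool) : Decidable (Spec_is_local p objects out) := by unfold Spec_is_local; infer_instance

-- ===== CLAIM (what is proved, stated in full; the proofs are below) =====
def Claim_equal_is_local : Prop := ∀ (p : String) (objects : List String), Dom_is_local p objects → Spec_is_local p objects (is_local p objects)

-- ===== LEMMAS AND PROOFS =====

-- membership in B's accumulated set
theorem mem_segset (objects : List String) (s0 : PySem.Set (List Char)) (x : List Char) :
    (x ∈ objects.foldl (fun s o => PySem.Set.update s (PySem.Chars.splitOn o.toList ['.'])) s0) ↔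
      x ∈ s0 ∨ ∃ o ∈ objects, x ∈ PySem.Chars.splitOn o.toList ['.'] := by
  induction objects generalizing s0 with
  | nil => simp
  | cons a l ih =>
      simp only [List.foldl_cons, ih, PySem.Set.mem_update, List.mem_cons]
      constructor
      · rintro ((h | h) | ⟨o, ho, hx⟩)
        · exact Or.inl h
        · exact Or.inr ⟨a, Or.inl rfl, h⟩
        · exact Or.inr ⟨o, Or.inr ho, hx⟩
      · rintro (h | ⟨o, (rfl | ho), hx⟩)
        · exact Or.inl (Or.inl h)
        · exact Or.inl (Or.inr hx)
        · exact Or.inr ⟨o, ho, hx⟩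

-- "x followed by a dot is a prefix of q" ↔ "x is the part of q before some dot"
theorem prefix_dot (q x : List Char) :
    (x ++ ['.'] <+: q) ↔ ∃ k : Nat, k < q.length ∧ q.take k = x ∧ q[k]? = some '.' := by
  constructor
  · rintro ⟨t, ht⟩
    refine ⟨x.length, ?_, ?_, ?_⟩
    · subst ht; simp
    · subst ht; rw [List.append_assoc]; exact List.take_left ..
    · subst ht
      rw [List.append_assoc, List.getElem?_append_right (by simp)]
      simp
  · rintro ⟨k, hk, htake, hget⟩
    have h : q.take (k + 1) = x ++ ['.'] := by
      rw [List.take_add_one, htake, hget]; rfl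
    exact h ▸ List.take_prefix (k + 1) q

-- B's scan over enumerate(q), characterised
theorem bside (q : List Char) (s : PySem.Set (List Char)) :
    ((PySem.List.enumerate q).any (fun ic =>
        ic.2 == '.' && PySem.Set.contains s (PySem.List.slice q none (some ic.1))) = true)
      ↔ ∃ k : Nat, k < q.length ∧ q[k]? = some '.' ∧ q.take k ∈ s := by
  simp only [List.any_eq_true, PySem.List.mem_enumerate_iff, Bool.and_eq_true, beq_iff_eq,
    PySem.Set.contains_iff]
  constructor
  · rintro ⟨ic, ⟨k, hk, rfl⟩, hdot, hmem⟩
    have h0 : ((0 : Int) + (k : Nat), q[k]).1 = ((k : Nat) : Int) := by simp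
    rw [h0, PySem.List.slice_to q (Int.natCast_nonneg k), Int.toNat_natCast] at hmem
    exact ⟨k, hk, by rw [List.getElem?_eq_getElem hk]; exact congrArg some hdot, hmem⟩
  · rintro ⟨k, hk, hget, hmem⟩
    have hd : q[k] = '.' := by rw [List.getElem?_eq_getElem hk] at hget; exact Option.some.inj hget
    refine ⟨((0 : Int) + (k : Nat), q[k]), ⟨k, hk, rfl⟩, hd, ?_⟩
    have h0 : ((0 : Int) + (k : Nat), q[k]).1 = ((k : Nat) : Int) := by simp
    rw [h0, PySem.List.slice_to q (Int.natCast_nonneg k), Int.toNat_natCast]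
    exact hmem

theorem is_local_spec_aux (p : String) (objects : List String) :
    is_local p objects = is_local_alt p objects := by
  unfold is_local is_local_alt
  by_cases hc : objects.contains p
  · rw [if_pos hc, if_pos hc]
  · rw [if_neg hc, if_neg hc]
    rw [Bool.eq_iff_iff, bside]
    simp only [List.any_eq_true, Bool.or_eq_true, PySem.Chars.startswith_iff, prefix_dot,
      mem_segset, PySem.Set.mem_ofList, List.mem_map]
    constructor
    · rintro ⟨o, ho, ⟨k, hk, htake, hget⟩ | ⟨m, hm, k, hk, htake, hget⟩⟩
      · exact ⟨k, hk, hget, Or.inl ⟨o, ho, htake.symm⟩⟩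
      · exact ⟨k, hk, hget, Or.inr ⟨o, ho, htake ▸ hm⟩⟩
    · rintro ⟨k, hk, hget, ⟨o, ho, hx⟩ | ⟨o, ho, hx⟩⟩
      · exact ⟨o, ho, Or.inl ⟨k, hk, hx.symm, hget⟩⟩
      · exact ⟨o, ho, Or.inr ⟨_, hx, k, hk, rfl, hget⟩⟩

-- ===== VERDICT (by name: the statement is the Claim_ definition above) =====
theorem is_local_spec : Claim_equal_is_local := by
  intro p objects _
  unfold Spec_is_local
  exact is_local_spec_aux p objects
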